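-- pv_equiv track=rewrite | github.com/GlebikGlebik/algorithms-and-data-structures | lab3/task3/src/scarecrow_sort.py | scarecrow_sort
-- ===== SOURCE A (Python) =====
-- def scarecrow_sort(n, k, arr):
--     """
--     :param n: Количество матрёшек.
--     :param k: Размах рук (расстояние для обмена).
--     :param arr: Список размеров матрёшек.
--     :return: True, если сортировка возможна, иначе False.
--     :raises ValueError: Если длина массива не равна n.
--     """
--
--     # Создаём список групп, где каждая группа соответствует позиции по модулю k
--     groups = [[] for _ in range(k)]
--     for index in range(n):
--         groups[index % k].append(arr[index])
--
--     # Сортируем каждую группу по неубыванию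
--     for group in groups:
--         group.sort()
--
--     # Сортированный массив для сравнения
--     sorted_arr = sorted(arr)
--
--     # Проверяем, можно ли собрать отсортированный массив из отсортированных групп
--     for index in range(n):
--         group_index = index % k
--         element_index = index // k
--         if element_index >= len(groups[group_index]):
--             # Это условие обычно не должно возникать, но добавляем для безопасности
--             return False
--         actual_value = groups[group_index][element_index]
--         expected_value = sorted_arr[index]
--         if actual_value != expected_value:
--             return False
--     return True
-- ===== SOURCE B (Python) =====
-- def scarecrow_sort(n, k, arr):
--     # Swaps at distance k permute only within residue classes mod k, so the array is
--     # sortable iff, per residue class, arr and sorted(arr) hold the same multiset.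
--     # One pass with a difference counter keyed by (index % k, value); no group lists,
--     # no per-group sorting, no reconstruction pass.
--     sorted_arr = sorted(arr)
--     delta = {}
--     for index in range(n):
--         key = (index % k, arr[index])
--         delta[key] = delta.get(key, 0) + 1
--         key = (index % k, sorted_arr[index])
--         delta[key] = delta.get(key, 0) - 1
--     return not any(delta.values())
-- ===== Notes on version B (the rewrite author's own statement) =====
-- stated objective: alternative
-- what changed: A builds k bucket lists, sorts every bucket, and re-walks all n positions comparing reconstructed elements against sorted(arr) with early returns; B never builds or sorts buckets: it makes one pass keeping a difference counter keyed by (index % k, value), incremented for arr and decremented for sorted(arr), and answers true iff every count is zero (multiset equality per residue class, which is exactly what reachability by distance-k swaps means).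
import Mathlib
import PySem

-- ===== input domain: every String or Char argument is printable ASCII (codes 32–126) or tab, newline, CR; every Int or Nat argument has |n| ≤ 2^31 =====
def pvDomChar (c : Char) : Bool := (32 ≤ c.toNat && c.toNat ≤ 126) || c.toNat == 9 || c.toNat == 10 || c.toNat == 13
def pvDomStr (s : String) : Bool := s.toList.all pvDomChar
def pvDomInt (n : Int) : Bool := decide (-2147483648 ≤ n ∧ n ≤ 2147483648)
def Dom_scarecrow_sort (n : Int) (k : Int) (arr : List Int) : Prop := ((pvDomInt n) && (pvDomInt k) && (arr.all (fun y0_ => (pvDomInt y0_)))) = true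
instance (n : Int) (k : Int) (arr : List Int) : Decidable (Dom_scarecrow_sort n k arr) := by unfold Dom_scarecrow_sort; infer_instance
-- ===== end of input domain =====

-- B replaces A's bucket-build / per-bucket-sort / reconstruct-and-compare passes by a single
-- pass over a difference counter keyed by (index % k, value) (objective: alternative).

-- ===== PORT A =====
-- the final 'for index in range(n)' loop of A, with its two early 'return False's
def scarecrowCheck (k : Int) (sgroups : List (List Int)) (sorted_arr : List Int) : List Int → Bool
  | [] => true
  | index :: rest =>
    let group_index := (PySem.Int.mod index k).toNat
    let element_index := PySem.Int.floordiv index k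
    if ((sgroups.getD group_index []).length : Int) ≤ element_index then false
    else if PySem.List.pyGetD (sgroups.getD group_index []) element_index 0
            ≠ PySem.List.pyGetD sorted_arr index 0 then false
    else scarecrowCheck k sgroups sorted_arr rest

def scarecrow_sort (n : Int) (k : Int) (arr : List Int) : Bool :=
  -- groups = [[] for _ in range(k)]; groups[index % k].append(arr[index]) for index in range(n)
  -- (for k > 0, index % k is in [0, k), so the Python list index is its toNat; 'arr[index]' and
  -- 'groups[index % k]' raise only outside Pre_, where getD's default is never the result)
  let groups :=
    (PySem.List.pyRange 0 n 1).foldl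
      (fun gs index => gs.modify (PySem.Int.mod index k).toNat
        (fun g => g ++ [PySem.List.pyGetD arr index 0]))
      ((PySem.List.pyRange 0 k 1).map (fun _ => ([] : List Int)))
  -- for group in groups: group.sort()
  let sgroups := groups.map (fun g => PySem.List.sorted g id)
  -- sorted_arr = sorted(arr)
  let sorted_arr := PySem.List.sorted arr id
  scarecrowCheck k sgroups sorted_arr (PySem.List.pyRange 0 n 1)

-- ===== PORT B =====
def scarecrow_sort_alt (n : Int) (k : Int) (arr : List Int) : Bool :=
  -- sorted_arr = sorted(arr)
  let sorted_arr := PySem.List.sorted arr id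
  -- delta = {}; one pass: delta[(index % k, arr[index])] += 1; delta[(index % k, sorted_arr[index])] -= 1
  -- (d[key] = d.get(key, 0) + 1 is insert with getD; '% k' and 'arr[index]' raise only outside Pre_)
  let delta :=
    (PySem.List.pyRange 0 n 1).foldl
      (fun d index =>
        let key1 := (PySem.Int.mod index k, PySem.List.pyGetD arr index 0)
        let d1 := d.insert key1 (d.getD key1 0 + 1)
        let key2 := (PySem.Int.mod index k, PySem.List.pyGetD sorted_arr index 0)
        d1.insert key2 (d1.getD key2 0 - 1))
      (PySem.Dict.empty : PySem.Dict (Int × Int) Int)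
  -- return not any(delta.values())   (an int is truthy iff nonzero)
  !(delta.values.any (fun v => v != 0))

-- ===== PRECONDITION & SPEC =====
-- Pre_ is exactly where the Python A returns: for n > 0 it raises ZeroDivisionError at k = 0,
-- IndexError for k < 0 ('groups[index % k]' on the empty groups list) and for n > len(arr) ('arr[index]').
def Pre_scarecrow_sort (n : Int) (k : Int) (arr : List Int) : Prop :=
  n ≤ 0 ∨ (1 ≤ k ∧ n ≤ arr.length)
instance (n : Int) (k : Int) (arr : List Int) : Decidable (Pre_scarecrow_sort n k arr) := by
  unfold Pre_scarecrow_sort; infer_instance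

def pvWitness_scarecrow_sort : Int × Int × List Int := (4, 2, [3, 0, 2, 1])

def Spec_scarecrow_sort (n : Int) (k : Int) (arr : List Int) (out : Bool) : Prop := out = scarecrow_sort_alt n k arr
instance (n : Int) (k : Int) (arr : List Int) (out : Bool) : Decidable (Spec_scarecrow_sort n k arr out) := by unfold Spec_scarecrow_sort; infer_instance

-- ===== CLAIM (what is proved, stated in full; the proofs are below) =====
def Claim_equal_scarecrow_sort : Prop := ∀ (n : Int) (k : Int) (arr : List Int), Dom_scarecrow_sort n k arr → Pre_scarecrow_sort n k arr → Spec_scarecrow_sort n k arr (scarecrow_sort n k arr)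

-- ===== LEMMAS AND PROOFS =====

-- the indices < N congruent to r mod K are r, r+K, ..., r+(c-1)K for the unique c with
-- N ≤ r + cK and (c = 0 or r + (c-1)K < N)
theorem scarecrow_filter_char (K r : Nat) (hK : 0 < K) (hr : r < K) (N : Nat) :
    ∃ c, (List.range N).filter (fun i => i % K = r) = (List.range c).map (fun j => r + j * K)
      ∧ N ≤ r + c * K ∧ (c = 0 ∨ r + (c - 1) * K < N) := by
  induction N with
  | zero => exact ⟨0, by simp, by omega, Or.inl rfl⟩
  | succ N ih =>
    obtain ⟨c, hfil, hub, hlb⟩ := ih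
    by_cases hm : N % K = r
    · obtain ⟨m, hmN⟩ : ∃ m, N = m * K + r := by
        refine ⟨N / K, ?_⟩
        rw [← hm, Nat.mul_comm]
        exact (Nat.div_add_mod N K).symm
      have hmc : m = c := by
        rcases hlb with h0 | h1
        · subst h0
          simp only [Nat.zero_mul, Nat.add_zero] at hub
          have hm0 : m * K = 0 := by omega
          rcases Nat.mul_eq_zero.mp hm0 with h | h
          · exact h
          · omega
        · have e1 : (c - 1) * K < m * K := by omega
          have e2 : m * K ≤ c * K := by omega
          have g1 := Nat.lt_of_mul_lt_mul_right e1
          have g2 := Nat.le_of_mul_le_mul_right e2 hK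
          omega
      subst hmc
      refine ⟨m + 1, ?_, ?_, ?_⟩
      · rw [List.range_succ, List.filter_append, hfil, List.range_succ, List.map_append]
        simp [hmN, Nat.add_comm, Nat.mul_comm, Nat.mod_eq_of_lt hr]
      · have hck : (m + 1) * K = m * K + K := by ring
        omega
      · right
        simp only [Nat.add_sub_cancel]
        omega
    · refine ⟨c, ?_, ?_, ?_⟩
      · rw [List.range_succ, List.filter_append, hfil]; simp [hm]
      · rcases Nat.lt_or_ge N (r + c * K) with h | h
        · omega
        · exfalso
          have hNe : N = r + c * K := by omega
          apply hm
          rw [hNe, Nat.add_mul_mod_self_right, Nat.mod_eq_of_lt hr]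
      · rcases hlb with h0 | h1
        · exact Or.inl h0
        · exact Or.inr (by omega)

-- the residue class of r among the first N positions of xs
def scarecrowCls (K N : Nat) (xs : List Int) (r : Nat) : List Int :=
  ((List.range N).filter (fun i => i % K = r)).map (fun i => xs.getD i 0)

-- A's group-building loop produces exactly the residue classes
theorem scarecrow_build_eq (arr : List Int) (K : Nat) (N : Nat) :
    (List.range N).foldl
        (fun gs i => gs.modify (i % K) (fun g => g ++ [arr.getD i 0]))
        ((List.range K).map (fun _ => ([] : List Int)))
      = (List.range K).map
          (fun r => ((List.range N).filter (fun i => i % K = r)).map (fun i => arr.getD i 0)) := by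
  induction N with
  | zero => simp
  | succ N ih =>
    rw [List.range_succ, List.foldl_append, ih]
    apply List.ext_getElem
    · simp
    · intro r h1 h2
      simp only [List.foldl_cons, List.foldl_nil] at *
      rw [List.getElem_modify]
      rw [List.getElem_map, List.getElem_map, List.getElem_range]
      by_cases hm : N % K = r
      · simp [hm, List.filter_append]
      · simp [hm, List.filter_append]

-- A's early-return check loop is an 'all' over the same index list
theorem scarecrow_check_all (k : Int) (sg : List (List Int)) (sa : List Int) (l : List Int) :
    scarecrowCheck k sg sa l
      = l.all (fun i =>
          decide (PySem.Int.floordiv i k < ((sg.getD (PySem.Int.mod i k).toNat []).length : Int)) &&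
          (PySem.List.pyGetD (sg.getD (PySem.Int.mod i k).toNat []) (PySem.Int.floordiv i k) 0
            == PySem.List.pyGetD sa i 0)) := by
  induction l with
  | nil => rfl
  | cons i rest ih =>
    simp only [scarecrowCheck, List.all_cons]
    by_cases h1 : ((sg.getD (PySem.Int.mod i k).toNat []).length : Int) ≤ PySem.Int.floordiv i k
    · rw [if_pos h1, decide_eq_false (by omega :
        ¬ (PySem.Int.floordiv i k < ((sg.getD (PySem.Int.mod i k).toNat []).length : Int))),
        Bool.false_and, Bool.false_and]
    · rw [if_neg h1, decide_eq_true (by omega :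
        PySem.Int.floordiv i k < ((sg.getD (PySem.Int.mod i k).toNat []).length : Int)),
        Bool.true_and]
      by_cases h2 : PySem.List.pyGetD (sg.getD (PySem.Int.mod i k).toNat []) (PySem.Int.floordiv i k) 0
            = PySem.List.pyGetD sa i 0
      · rw [if_neg (not_not_intro h2), ih, beq_iff_eq.mpr h2, Bool.true_and]
      · rw [if_pos h2, beq_eq_false_iff_ne.mpr h2, Bool.false_and]

-- the index-by-index check of the interleaved sorted groups against sa equals the
-- per-residue-class comparison of the sorted classes (bijection i ↔ (r, j), i = r + jK)
theorem scarecrow_bridge (arr sa : List Int) (K N : Nat) (hK : 0 < K) :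
    ((List.range N).all (fun i =>
        decide (i / K < (PySem.List.sorted (scarecrowCls K N arr (i % K)) id).length) &&
        ((PySem.List.sorted (scarecrowCls K N arr (i % K)) id).getD (i / K) 0 == sa.getD i 0)))
      = (List.range K).all (fun r =>
          PySem.List.sorted (scarecrowCls K N arr r) id == scarecrowCls K N sa r) := by
  rw [Bool.eq_iff_iff, List.all_eq_true, List.all_eq_true]
  constructor
  · intro h r hrm
    have hr : r < K := List.mem_range.mp hrm
    obtain ⟨c, hfil, hub, hlb⟩ := scarecrow_filter_char K r hK hr N
    have hlenA : (PySem.List.sorted (scarecrowCls K N arr r) id).length = c := by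
      rw [PySem.List.length_sorted, scarecrowCls, List.length_map, hfil, List.length_map,
        List.length_range]
    have hlenB : (scarecrowCls K N sa r).length = c := by
      rw [scarecrowCls, List.length_map, hfil, List.length_map, List.length_range]
    rw [beq_iff_eq]
    apply List.ext_getElem (by rw [hlenA, hlenB])
    intro j hj1 hj2
    have hjc : j < c := by rw [hlenA] at hj1; exact hj1
    have hjN : r + j * K < N := by
      rcases hlb with h0 | h1
      · omega
      · have : j * K ≤ (c - 1) * K := Nat.mul_le_mul_right K (by omega)
        omega
    have hspec := h _ (List.mem_range.mpr hjN)
    rw [Bool.and_eq_true, decide_eq_true_eq, beq_iff_eq] at hspec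
    obtain ⟨-, hv⟩ := hspec
    have hmod : (r + j * K) % K = r := by
      rw [Nat.add_mul_mod_self_right, Nat.mod_eq_of_lt hr]
    have hdiv : (r + j * K) / K = j := by
      rw [Nat.add_mul_div_right _ _ hK, Nat.div_eq_of_lt hr, Nat.zero_add]
    rw [hmod, hdiv] at hv
    have hmapB : scarecrowCls K N sa r = (List.range c).map (fun j => sa.getD (r + j * K) 0) := by
      rw [scarecrowCls, hfil, List.map_map]; rfl
    have hBj : (scarecrowCls K N sa r)[j]'hj2 = sa.getD (r + j * K) 0 := by
      simp only [hmapB, List.getElem_map, List.getElem_range]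
    rw [hBj, ← hv]
    exact (List.getD_eq_getElem _ 0 hj1).symm
  · intro h i him
    have hi : i < N := List.mem_range.mp him
    have hr : i % K < K := Nat.mod_lt _ hK
    obtain ⟨c, hfil, hub, hlb⟩ := scarecrow_filter_char K (i % K) hK hr N
    have hlenA : (PySem.List.sorted (scarecrowCls K N arr (i % K)) id).length = c := by
      rw [PySem.List.length_sorted, scarecrowCls, List.length_map, hfil, List.length_map,
        List.length_range]
    have hirj : i = i % K + (i / K) * K := by
      have h0 := Nat.div_add_mod i K
      have h1 : (i / K) * K = K * (i / K) := Nat.mul_comm _ _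
      omega
    have hjc : i / K < c := by
      have h1 : (i / K) * K < c * K := by omega
      exact Nat.lt_of_mul_lt_mul_right h1
    have heq := h _ (List.mem_range.mpr hr)
    rw [beq_iff_eq] at heq
    rw [Bool.and_eq_true, decide_eq_true_eq, beq_iff_eq]
    refine ⟨by omega, ?_⟩
    have hmapB : scarecrowCls K N sa (i % K)
        = (List.range c).map (fun j => sa.getD (i % K + j * K) 0) := by
      rw [scarecrowCls, hfil, List.map_map]; rfl
    rw [List.getD_eq_getElem _ 0
      (by omega : i / K < (PySem.List.sorted (scarecrowCls K N arr (i % K)) id).length)]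
    have hget := List.getElem_of_eq heq
      (by omega : i / K < (PySem.List.sorted (scarecrowCls K N arr (i % K)) id).length)
    rw [hget]
    simp only [hmapB, List.getElem_map, List.getElem_range]
    rw [← hirj]

-- A, normalized: its interleaved check over Nat indices
theorem scarecrow_A_norm (n k : Int) (arr : List Int) (N K : Nat)
    (hn : n = (N : Int)) (hk : k = (K : Int)) (hK : 0 < K) :
    scarecrow_sort n k arr
      = (List.range N).all (fun i =>
          decide (i / K < (PySem.List.sorted (scarecrowCls K N arr (i % K)) id).length) &&
          ((PySem.List.sorted (scarecrowCls K N arr (i % K)) id).getD (i / K) 0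
            == (PySem.List.sorted arr id).getD i 0)) := by
  subst hn hk
  rw [scarecrow_sort]
  simp only [scarecrow_check_all]
  rw [PySem.List.pyRange_one, PySem.List.pyRange_one]
  simp only [Int.sub_zero, Int.toNat_natCast, Int.zero_add, List.foldl_map, List.all_map,
    List.map_map]
  simp only [PySem.Int.mod_natCast, PySem.Int.floordiv_natCast, Int.toNat_natCast,
    PySem.List.pyGetD_natCast, Function.comp_def]
  rw [scarecrow_build_eq]
  refine congrArg _ (funext fun i => ?_)
  rw [List.map_map, PySem.List.getD_map_range _ _ _ _ (Nat.mod_lt i hK)]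
  simp only [Function.comp_apply, Nat.cast_lt, scarecrowCls]
  simp

-- ---- B side ----

-- one signed-counter update, the body of B's dict loop
def pvStep (d : PySem.Dict (Int × Int) Int) (p : (Int × Int) × Int) : PySem.Dict (Int × Int) Int :=
  d.insert p.1 (d.getD p.1 0 + p.2)

-- the key B counts under, over Nat indices
def scarecrowKey (K : Nat) (xs : List Int) (i : Nat) : Int × Int :=
  (((i % K : Nat) : Int), xs.getD i 0)

-- how often a key occurs among the first N positions of xs
def scarecrowCnt (K N : Nat) (xs : List Int) (q : Int × Int) : Nat :=
  (List.range N).countP (fun i => scarecrowKey K xs i == q)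

-- B's dict loop, over Nat indices
def pvLoop (K N : Nat) (arr sa : List Int) : PySem.Dict (Int × Int) Int :=
  (List.range N).foldl
    (fun d i => pvStep (pvStep d (scarecrowKey K arr i, 1)) (scarecrowKey K sa i, -1))
    PySem.Dict.empty

-- a fold whose body does the two updates is the single-update fold over the flattened pair list
theorem pv_foldl_pair (f g : Nat → ((Int × Int) × Int)) (l : List Nat)
    (d : PySem.Dict (Int × Int) Int) :
    l.foldl (fun d i => pvStep (pvStep d (f i)) (g i)) d
      = (l.flatMap (fun i => [f i, g i])).foldl
          (fun d p => d.insert p.1 (d.getD p.1 0 + p.2)) d := by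
  induction l generalizing d with
  | nil => rfl
  | cons i rest ih =>
    rw [List.flatMap_cons, List.foldl_append, List.foldl_cons, List.foldl_cons, ih]
    rfl

-- the value of the difference counter at q after the loop: #occurrences under f minus under g
theorem pv_getD_two (f g : Nat → Int × Int) (l : List Nat)
    (d : PySem.Dict (Int × Int) Int) (q : Int × Int) :
    (l.foldl (fun d i => pvStep (pvStep d (f i, 1)) (g i, -1)) d).getD q 0
      = d.getD q 0 + (l.countP (fun i => f i == q) : Int) - (l.countP (fun i => g i == q) : Int) := by
  induction l generalizing d with
  | nil => simp
  | cons i rest ih =>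
    rw [List.foldl_cons, ih]
    have e : ∀ (d : PySem.Dict (Int × Int) Int),
        (pvStep (pvStep d (f i, 1)) (g i, -1)).getD q 0
          = d.getD q 0 + (if q = f i then 1 else 0) - (if q = g i then 1 else 0) := by
      intro d
      simp only [pvStep, PySem.Dict.getD_insert]
      by_cases h2 : q = g i <;> by_cases h1 : q = f i <;> by_cases h3 : g i = f i <;>
        simp_all <;> omega
    rw [e]
    simp only [List.countP_cons, beq_iff_eq]
    by_cases h1 : q = f i <;> by_cases h2 : q = g i <;>
      simp [h1, h2, eq_comm] <;> push_cast <;> omega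

-- B's port equals its Nat-index loop
theorem scarecrow_alt_eq (n k : Int) (arr : List Int) (N K : Nat)
    (hn : n = (N : Int)) (hk : k = (K : Int)) :
    scarecrow_sort_alt n k arr
      = !((pvLoop K N arr (PySem.List.sorted arr id)).values.any (fun v => v != 0)) := by
  subst hn hk
  rw [scarecrow_sort_alt]
  rw [PySem.List.pyRange_one]
  simp only [Int.sub_zero, Int.toNat_natCast, Int.zero_add, List.foldl_map]
  rw [pvLoop]
  refine congrArg (fun d : PySem.Dict (Int × Int) Int => !(d.values.any (fun v => v != 0))) ?_
  apply PySem.List.foldl_congr_mem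
  intro d i hi
  simp [pvStep, scarecrowKey, PySem.Int.mod_natCast, PySem.List.pyGetD_natCast, sub_eq_add_neg]

-- B, normalized: 'every difference count is zero'
theorem scarecrow_B_norm (n k : Int) (arr : List Int) (N K : Nat)
    (hn : n = (N : Int)) (hk : k = (K : Int)) :
    (scarecrow_sort_alt n k arr = true)
      ↔ ∀ q : Int × Int, scarecrowCnt K N arr q = scarecrowCnt K N (PySem.List.sorted arr id) q := by
  rw [scarecrow_alt_eq n k arr N K hn hk]
  set delta := pvLoop K N arr (PySem.List.sorted arr id) with hdelta
  have hget : ∀ q : Int × Int, delta.getD q 0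
      = (scarecrowCnt K N arr q : Int) - (scarecrowCnt K N (PySem.List.sorted arr id) q : Int) := by
    intro q
    rw [hdelta, pvLoop, pv_getD_two, PySem.Dict.getD_empty]
    simp [scarecrowCnt]
  have hnd : delta.keys.Nodup := by
    rw [hdelta, pvLoop, pv_foldl_pair]
    exact PySem.Dict.nodup_keys_foldl_insert_key _ Prod.fst _ _ PySem.Dict.nodup_keys_empty
  rw [Bool.not_eq_true', List.any_eq_false]
  constructor
  · intro h q
    have hz : delta.getD q 0 = 0 := by
      cases hg : delta.get? q with
      | none => rw [PySem.Dict.getD_eq_get?_getD, hg]; rfl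
      | some v =>
        have hmem : (q, v) ∈ delta.items := PySem.Dict.mem_items_of_get?_eq_some _ hg
        have hvv : v ∈ delta.values := by
          simp only [PySem.Dict.values]
          exact List.mem_map_of_mem hmem
        have hv0 : v = 0 := by simpa using h v hvv
        rw [PySem.Dict.getD_eq_get?_getD, hg, hv0]; rfl
    have := hget q
    omega
  · intro h v hv
    rw [PySem.Dict.values_eq_map_keys delta hnd 0] at hv
    obtain ⟨q, hq, rfl⟩ := List.mem_map.mp hv
    have h1 := hget q
    have h2 := h q
    simp only [bne_iff_ne, ne_eq, Decidable.not_not]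
    omega

-- counting a key (r, v) is counting v in the residue class of r
theorem scarecrow_count_cls (K N : Nat) (xs : List Int) (r : Nat) (v : Int) :
    (scarecrowCls K N xs r).count v = scarecrowCnt K N xs (((r : Nat) : Int), v) := by
  rw [scarecrowCls, scarecrowCnt, List.count_eq_countP, List.countP_map, List.countP_filter]
  apply List.countP_congr
  intro i _
  simp only [Function.comp_apply, scarecrowKey]
  rw [Bool.eq_iff_iff, Bool.and_eq_true, beq_iff_eq, beq_iff_eq, decide_eq_true_eq, Prod.ext_iff]
  simp [and_comm]
  intro _
  omega

-- the residue class of sorted(arr) is itself nondecreasing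
theorem scarecrow_cls_pairwise (arr : List Int) (K N r : Nat) (hK : 0 < K) (hr : r < K)
    (hN : N ≤ arr.length) :
    (scarecrowCls K N (PySem.List.sorted arr id) r).Pairwise (· ≤ ·) := by
  obtain ⟨c, hfil, hub, hlb⟩ := scarecrow_filter_char K r hK hr N
  have hmap : scarecrowCls K N (PySem.List.sorted arr id) r
      = (List.range c).map (fun j => (PySem.List.sorted arr id).getD (r + j * K) 0) := by
    rw [scarecrowCls, hfil, List.map_map]; rfl
  rw [hmap, List.pairwise_iff_getElem]
  intro p q hp hq hpq
  simp only [List.length_map, List.length_range] at hp hq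
  simp only [List.getElem_map, List.getElem_range]
  have hlen : (PySem.List.sorted arr id).length = arr.length :=
    PySem.List.length_sorted arr id false
  have hqN : r + q * K < N := by
    rcases hlb with h0 | h1
    · omega
    · have : q * K ≤ (c - 1) * K := Nat.mul_le_mul_right K (by omega)
      omega
  have hpN : r + p * K < N := by
    have : p * K ≤ q * K := Nat.mul_le_mul_right K (by omega)
    omega
  have hpl : r + p * K < (PySem.List.sorted arr id).length := by omega
  have hql : r + q * K < (PySem.List.sorted arr id).length := by omega
  rw [List.getD_eq_getElem _ 0 hpl, List.getD_eq_getElem _ 0 hql]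
  have hle : r + p * K ≤ r + q * K := by
    have : p * K ≤ q * K := Nat.mul_le_mul_right K (by omega)
    omega
  exact PySem.List.sorted_id_getElem_mono arr hle hql

-- 'same multiset per residue class' is exactly A's 'sorted class equals class of sorted(arr)'
theorem scarecrow_BtoA (arr : List Int) (K N : Nat) (hK : 0 < K) (hN : N ≤ arr.length) :
    (∀ q : Int × Int, scarecrowCnt K N arr q = scarecrowCnt K N (PySem.List.sorted arr id) q)
      ↔ ∀ r ∈ List.range K,
          (PySem.List.sorted (scarecrowCls K N arr r) id
            == scarecrowCls K N (PySem.List.sorted arr id) r) = true := by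
  constructor
  · intro h r hrm
    have hr : r < K := List.mem_range.mp hrm
    rw [beq_iff_eq]
    have hperm : (scarecrowCls K N (PySem.List.sorted arr id) r).Perm (scarecrowCls K N arr r) := by
      rw [List.perm_iff_count]
      intro v
      rw [scarecrow_count_cls K N _ r v, scarecrow_count_cls K N arr r v]
      exact (h (((r : Nat) : Int), v)).symm
    exact PySem.List.sorted_id_eq_of_perm_of_pairwise _ _ hperm
      (scarecrow_cls_pairwise arr K N r hK hr hN)
  · intro h q
    rcases q with ⟨x, v⟩
    by_cases hx : 0 ≤ x ∧ x < (K : Int)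
    · have hr : x.toNat < K := by omega
      have hxr : ((x.toNat : Nat) : Int) = x := by omega
      have heq := h x.toNat (List.mem_range.mpr hr)
      rw [beq_iff_eq] at heq
      have hp1 : (scarecrowCls K N arr x.toNat).Perm
          (PySem.List.sorted (scarecrowCls K N arr x.toNat) id) :=
        (PySem.List.sorted_perm _ _ _).symm
      rw [heq] at hp1
      have := List.perm_iff_count.mp hp1 v
      rw [scarecrow_count_cls K N arr x.toNat v, scarecrow_count_cls K N _ x.toNat v, hxr] at this
      exact this
    · have hz : ∀ xs : List Int, scarecrowCnt K N xs (x, v) = 0 := by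
        intro xs
        rw [scarecrowCnt, List.countP_eq_zero]
        intro i _
        simp only [scarecrowKey, beq_iff_eq, Prod.mk.injEq, not_and]
        intro hc
        exfalso
        have h1 : (0 : Int) ≤ ((i % K : Nat) : Int) := by positivity
        have h2 : ((i % K : Nat) : Int) < (K : Int) := by
          exact_mod_cast Nat.mod_lt i hK
        rw [hc] at h1 h2
        exact hx ⟨h1, h2⟩
      rw [hz arr, hz (PySem.List.sorted arr id)]

-- ===== VERDICT (by name: the statement is the Claim_ definition above) =====
theorem scarecrow_sort_spec : Claim_equal_scarecrow_sort := by
  intro n k arr _hdom hpre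
  unfold Spec_scarecrow_sort
  by_cases hn : n ≤ 0
  · rw [scarecrow_sort, scarecrow_sort_alt, PySem.List.pyRange_one_eq_nil hn]
    rfl
  · obtain ⟨hk, hlen⟩ : 1 ≤ k ∧ n ≤ (arr.length : Int) := hpre.resolve_left hn
    have hnN : n = ((n.toNat : Nat) : Int) := (Int.toNat_of_nonneg (by omega)).symm
    have hkK : k = ((k.toNat : Nat) : Int) := (Int.toNat_of_nonneg (by omega)).symm
    rw [Bool.eq_iff_iff]
    rw [scarecrow_A_norm n k arr n.toNat k.toNat hnN hkK (by omega),
      scarecrow_bridge arr (PySem.List.sorted arr id) k.toNat n.toNat (by omega),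
      scarecrow_B_norm n k arr n.toNat k.toNat hnN hkK,
      List.all_eq_true]
    exact (scarecrow_BtoA arr k.toNat n.toNat (by omega) (by omega)).symm
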